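-- pv_equiv track=rewrite | github.com/Sofianebouaziz1/FLASH-RL | prints/result_plot.py | assendante_list
-- ===== SOURCE A (Python) =====
-- def assendante_list(unelist):
--     max = 0
--     cpt = 0
--     max_list = []
--     comm_rond = []
--     for i in range(0, len(unelist)):
--         if(unelist[i] > max):
--             max = unelist[i]
--             max_list.append(unelist[i])
--             comm_rond.append(cpt)
--         cpt = cpt + 1
--
--     if(comm_rond[-1] != len(unelist)):
--         max_list.append(max_list[-1])
--         comm_rond.append(len(unelist))
--
--     return max_list, comm_rond
-- ===== SOURCE B (Python) =====
-- def assendante_list(unelist):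
--     # Different decomposition: build the running-maximum sequence seeded at 0, then
--     # read the breakpoints off consecutive pairs where it strictly increases.
--     runmax = [0]
--     for x in unelist:
--         runmax.append(x if x > runmax[-1] else runmax[-1])
--     pairs = [(hi, i) for i, (lo, hi) in enumerate(zip(runmax, runmax[1:])) if hi > lo]
--     max_list = [v for v, _ in pairs]
--     comm_rond = [i for _, i in pairs]
--     max_list.append(max_list[-1])
--     comm_rond.append(len(unelist))
--     return max_list, comm_rond
-- ===== Notes on version B (the rewrite author's own statement) =====
-- stated objective: alternative
-- what changed: B replaces A's single stateful index loop (mutable running max + counter + conditional appends + a final repair branch) by a scan/derive decomposition: build the 0-seeded running-maximum sequence in one pass, then read the breakpoints off consecutive pairs where it strictly increases, and always append the closing plot point.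
import Mathlib
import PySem

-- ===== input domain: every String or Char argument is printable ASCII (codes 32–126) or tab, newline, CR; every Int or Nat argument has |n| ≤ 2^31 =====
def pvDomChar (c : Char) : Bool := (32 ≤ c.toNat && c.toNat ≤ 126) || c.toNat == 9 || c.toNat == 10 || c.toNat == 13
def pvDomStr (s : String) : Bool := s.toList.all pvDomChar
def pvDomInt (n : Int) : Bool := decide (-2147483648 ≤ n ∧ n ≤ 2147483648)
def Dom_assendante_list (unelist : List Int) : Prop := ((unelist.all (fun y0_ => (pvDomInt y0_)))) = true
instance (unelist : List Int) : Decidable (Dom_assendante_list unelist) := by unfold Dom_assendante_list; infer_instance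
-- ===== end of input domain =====

-- B rebuilds the same breakpoint lists from the running-maximum sequence (scan then derive)
-- instead of A's single stateful loop; equal cost, different decomposition.

-- ===== PORT A =====
-- 'for i in range(0, len(unelist))' with 'unelist[i]' and the counter cpt (= i) is folded over
-- enumerate; exact since i is always in range and cpt equals i at each step.
def assendante_list (unelist : List Int) : List Int × List Int :=
  let st := (PySem.List.enumerate unelist).foldl
    (fun (st : Int × List Int × List Int) (p : Int × Int) =>
      if p.2 > st.1 then (p.2, st.2.1 ++ [p.2], st.2.2 ++ [p.1]) else st)
    (0, [], [])
  let ml := st.2.1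
  let cr := st.2.2
  match PySem.List.pyGet? cr (-1) with
  | none => (ml, cr)  -- Python raises IndexError here (comm_rond empty); excluded by Pre_
  | some last =>
      if last ≠ (unelist.length : Int) then
        -- max_list[-1]: ml is nonempty whenever cr is, so getD 0 is exact here
        (ml ++ [(PySem.List.pyGet? ml (-1)).getD 0], cr ++ [(unelist.length : Int)])
      else (ml, cr)

-- ===== PORT B =====
def assendante_list_alt (unelist : List Int) : List Int × List Int :=
  -- runmax[-1]: acc is always nonempty (seeded with [0]), so getD 0 is exact
  let runmax := unelist.foldl
    (fun (acc : List Int) x =>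
      acc ++ [if x > (PySem.List.pyGet? acc (-1)).getD 0 then x
              else (PySem.List.pyGet? acc (-1)).getD 0]) [0]
  let pairs := (PySem.List.enumerate (runmax.zip (PySem.List.slice runmax (some 1) none))).filterMap
    (fun (p : Int × Int × Int) => if p.2.2 > p.2.1 then some (p.2.2, p.1) else none)
  let ml := pairs.map (·.1)
  let cr := pairs.map (·.2)
  -- max_list[-1]: Python raises IndexError when pairs is empty; excluded by Pre_
  (ml ++ [(PySem.List.pyGet? ml (-1)).getD 0], cr ++ [(unelist.length : Int)])

-- ===== PRECONDITION & SPEC =====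
-- Pre_ excludes exactly the inputs with no strictly positive element: there A raises
-- IndexError (comm_rond[-1] on an empty list), and B raises IndexError too (max_list[-1]).
def Pre_assendante_list (unelist : List Int) : Prop := ∃ x ∈ unelist, 0 < x
instance (unelist : List Int) : Decidable (Pre_assendante_list unelist) := by unfold Pre_assendante_list; infer_instance
def pvWitness_assendante_list : List Int := [1]

def Spec_assendante_list (unelist : List Int) (out : List Int × List Int) : Prop := out = assendante_list_alt unelist
instance (unelist : List Int) (out : List Int × List Int) : Decidable (Spec_assendante_list unelist out) := by unfold Spec_assendante_list; infer_instance

-- ===== CLAIM (what is proved, stated in full; the proofs are below) =====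
def Claim_equal_assendante_list : Prop := ∀ (unelist : List Int), Dom_assendante_list unelist → Pre_assendante_list unelist → Spec_assendante_list unelist (assendante_list unelist)

-- ===== LEMMAS AND PROOFS =====

-- The common breakpoint structure: (value, index) pairs where the running max (baseline m) strictly increases.
def brk (m : Int) (k : Int) : List Int → List (Int × Int)
  | [] => []
  | x :: xs => if x > m then (x, k) :: brk x (k + 1) xs else brk m (k + 1) xs

-- The tail of the running-maximum sequence with baseline m.
def scanTail (m : Int) : List Int → List Int
  | [] => []
  | x :: xs => (if x > m then x else m) :: scanTail (if x > m then x else m) xs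

theorem foldA_eq (xs : List Int) : ∀ (k m : Int) (ml cr : List Int),
    ((PySem.List.enumerate xs k).foldl
      (fun (st : Int × List Int × List Int) (p : Int × Int) =>
        if p.2 > st.1 then (p.2, st.2.1 ++ [p.2], st.2.2 ++ [p.1]) else st)
      (m, ml, cr)).2
    = (ml ++ (brk m k xs).map (·.1), cr ++ (brk m k xs).map (·.2)) := by
  induction xs with
  | nil => intro k m ml cr; simp [PySem.List.enumerate_nil, brk]
  | cons x xs ih =>
    intro k m ml cr
    rw [PySem.List.enumerate_cons]
    by_cases h : x > m
    · simp [List.foldl_cons, brk, ih, h]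
    · simp [List.foldl_cons, brk, ih, h]

theorem foldB_eq (xs : List Int) : ∀ (pre : List Int) (m : Int),
    xs.foldl
      (fun (acc : List Int) x =>
        acc ++ [if x > (PySem.List.pyGet? acc (-1)).getD 0 then x
                else (PySem.List.pyGet? acc (-1)).getD 0]) (pre ++ [m])
    = pre ++ m :: scanTail m xs := by
  induction xs with
  | nil => intro pre m; simp [scanTail]
  | cons x xs ih =>
    intro pre m
    simp only [List.foldl_cons, PySem.List.pyGet?_neg_one_append_singleton, Option.getD_some]
    have h2 := ih (pre ++ [m]) (if x > m then x else m)
    simp only [List.append_assoc, List.singleton_append] at h2 ⊢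
    rw [h2]
    simp [scanTail]

theorem pairs_eq (xs : List Int) : ∀ (m k : Int),
    (PySem.List.enumerate ((m :: scanTail m xs).zip (scanTail m xs)) k).filterMap
      (fun (p : Int × Int × Int) => if p.2.2 > p.2.1 then some (p.2.2, p.1) else none)
    = brk m k xs := by
  induction xs with
  | nil => intro m k; simp [scanTail, brk, PySem.List.enumerate_nil]
  | cons x xs ih =>
    intro m k
    by_cases h : x > m
    · simp [scanTail, List.zip_cons_cons, PySem.List.enumerate_cons,
        brk, ih x (k + 1), h]
    · simp [scanTail, List.zip_cons_cons, PySem.List.enumerate_cons,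
        brk, ih m (k + 1), h]

theorem brk_ne_nil (xs : List Int) : ∀ (m k : Int), (∃ x ∈ xs, m < x) → brk m k xs ≠ [] := by
  induction xs with
  | nil => intro m k h; rcases h with ⟨x, hx, _⟩; simp at hx
  | cons x xs ih =>
    intro m k h
    by_cases hx : x > m
    · simp [brk, hx]
    · rcases h with ⟨y, hy, hym⟩
      rcases List.mem_cons.mp hy with rfl | hy'
      · omega
      · simp only [brk, if_neg hx]
        exact ih m (k + 1) ⟨y, hy', hym⟩

theorem brk_snd_lt (xs : List Int) : ∀ (m k : Int) (p : Int × Int),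
    p ∈ brk m k xs → p.2 < k + xs.length := by
  induction xs with
  | nil => intro m k p hp; simp [brk] at hp
  | cons x xs ih =>
    intro m k p hp
    by_cases hx : x > m
    · simp only [brk, if_pos hx, List.mem_cons] at hp
      rcases hp with rfl | hp
      · simp
      · have := ih x (k + 1) p hp; simp at *; omega
    · simp only [brk, if_neg hx] at hp
      have := ih m (k + 1) p hp; simp at *; omega

-- ===== VERDICT (by name: the statement is the Claim_ definition above) =====
theorem assendante_list_spec : Claim_equal_assendante_list := by
  intro xs _ hpre
  unfold Spec_assendante_list assendante_list assendante_list_alt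
  -- identify both sides' lists with brk 0 0 xs
  have hA := foldA_eq xs 0 0 [] []
  have hB : xs.foldl
      (fun (acc : List Int) x =>
        acc ++ [if x > (PySem.List.pyGet? acc (-1)).getD 0 then x
                else (PySem.List.pyGet? acc (-1)).getD 0]) [0]
      = 0 :: scanTail 0 xs := foldB_eq xs [] 0
  simp only [hB, PySem.List.slice_from_one, List.tail_cons]
  rw [pairs_eq xs 0 0]
  set b := brk 0 0 xs with hbdef
  have hne : b ≠ [] := brk_ne_nil xs 0 0 hpre
  have hcr : b.map (·.2) ≠ [] := by simpa using hne
  -- A's state after the loop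
  rw [hA]
  simp only [List.nil_append]
  -- comm_rond[-1]
  rw [PySem.List.pyGet?_neg_one]
  cases hL : (b.map (·.2)).getLast? with
  | none => exact absurd (List.getLast?_eq_none_iff.mp hL) hcr
  | some v =>
    have hv : v ∈ b.map (·.2) := List.mem_of_getLast? hL
    have hlt : v ≠ (xs.length : Int) := by
      rcases List.mem_map.mp hv with ⟨p, hp, hpe⟩
      have := brk_snd_lt xs 0 0 p hp
      omega
    simp [hlt]
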